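-- pv_equiv track=rewrite | github.com/griffin-leonard/6.00-Psets | 6-0001_ps3/document_distance.py | find_bigrams
-- ===== SOURCE A (Python) =====
-- def find_bigrams(text):
--     """
--     Args:
--         text: string
--     Returns:
--         list of bigrams from input text
--     """
--     wordList = text.split()
--     wordPairs = []
--     pair = False
--     for i in wordList:
--         #saves the first word in wordList as word1, only executes once
--         if not pair:
--             word1 = i
--             pair = True
--         #for every subsequent word in wordList: creates a bigram (word_pair)
--         #and updates word1 so the next iteration of the loop correctly creates the next bigram
--         else:
--             word_pair = word1+' '+i
--             wordPairs.append(word_pair)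
--             word1 = i
--     return wordPairs
-- ===== SOURCE B (Python) =====
-- def find_bigrams(text):
--     """
--     Args:
--         text: string
--     Returns:
--         list of bigrams from input text
--     """
--     def bigrams(words):
--         # recursion on the word-list structure: head pair, then the rest
--         if len(words) < 2:
--             return []
--         return [words[0] + ' ' + words[1]] + bigrams(words[1:])
--     return bigrams(text.split())
-- ===== Notes on version B (the rewrite author's own statement) =====
-- stated objective: alternative
-- what changed: Replaced A's single stateful accumulator loop (boolean flag plus carried previous word) by a structural recursion on the word list that emits the head pair and recurses on the tail.
import Mathlib
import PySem

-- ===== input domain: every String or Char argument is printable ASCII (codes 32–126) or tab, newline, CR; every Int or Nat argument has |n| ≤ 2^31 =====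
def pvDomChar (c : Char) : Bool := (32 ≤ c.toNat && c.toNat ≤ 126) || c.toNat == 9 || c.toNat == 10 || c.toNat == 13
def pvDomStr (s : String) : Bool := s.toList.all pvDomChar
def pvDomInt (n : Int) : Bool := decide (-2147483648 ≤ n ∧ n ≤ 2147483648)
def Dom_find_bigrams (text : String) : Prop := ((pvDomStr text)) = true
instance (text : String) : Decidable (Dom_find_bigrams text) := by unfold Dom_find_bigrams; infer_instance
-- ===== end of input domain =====

-- B replaces A's stateful flag/word1 accumulator loop by structural recursion on the word list (alternative decomposition, same cost class).

-- ===== PORT A =====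
-- state: (wordPairs, pair, word1); word1 is Option since Python leaves it unbound until the first word
def find_bigrams (text : String) : List String :=
  let wordList := PySem.Str.split₀ text
  (wordList.foldl
    (fun (s : List String × Bool × Option String) i =>
      if !s.2.1 then (s.1, true, some i)
      else match s.2.2 with
        | some w1 => (s.1 ++ [w1 ++ " " ++ i], true, some i)
        | none => (s.1, true, some i))
    ([], false, none)).1

-- ===== PORT B =====
-- B's helper 'bigrams': recursion on the word list
def bigramsRec : List String → List String
  | a :: b :: t => (a ++ " " ++ b) :: bigramsRec (b :: t)
  | _ => []

def find_bigrams_alt (text : String) : List String :=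
  bigramsRec (PySem.Str.split₀ text)

-- ===== PRECONDITION & SPEC =====
def Spec_find_bigrams (text : String) (out : List String) : Prop := out = find_bigrams_alt text
instance (text : String) (out : List String) : Decidable (Spec_find_bigrams text out) := by unfold Spec_find_bigrams; infer_instance

-- ===== CLAIM (what is proved, stated in full; the proofs are below) =====
def Claim_equal_find_bigrams : Prop := ∀ (text : String), Dom_find_bigrams text → Spec_find_bigrams text (find_bigrams text)

-- ===== LEMMAS AND PROOFS =====
theorem pv_foldl_some (l : List String) (w : String) (acc : List String) :
    (l.foldl
      (fun (s : List String × Bool × Option String) i =>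
        if !s.2.1 then (s.1, true, some i)
        else match s.2.2 with
          | some w1 => (s.1 ++ [w1 ++ " " ++ i], true, some i)
          | none => (s.1, true, some i))
      (acc, true, some w)).1
    = acc ++ bigramsRec (w :: l) := by
  induction l generalizing acc w with
  | nil => simp [bigramsRec]
  | cons i t ih =>
    have h := ih i (acc ++ [w ++ " " ++ i])
    simp only [List.foldl_cons] at h ⊢
    simp at h ⊢
    simp [h, bigramsRec]

-- ===== VERDICT (by name: the statement is the Claim_ definition above) =====
theorem find_bigrams_spec : Claim_equal_find_bigrams := by
  intro text _
  unfold Spec_find_bigrams find_bigrams find_bigrams_alt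
  cases h : PySem.Str.split₀ text with
  | nil => simp [bigramsRec]
  | cons w t =>
    have hf := pv_foldl_some t w []
    simp at hf ⊢
    simpa using hf
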